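-- pv_equiv track=rewrite | github.com/szewmich/battle_ships | fun.py | locate_hits_modified
-- ===== SOURCE A (Python) =====
-- def locate_hits_modified(board_passed, n_seg, orient, field):
--     hits = []
--     if orient == 'hor':
--         # Only go further if there's enough space before the board's edge.
--         if field[1] + (n_seg - 1) < 10:
--             for k in range(n_seg):
--                 checked_field = [field[0], field[1] + k]
--                 # Only allowed 0 (unknown field) and 1 (hit, not yet sunk ships) and on top of existing ships
--                 if board_passed[checked_field[0]][checked_field[1]] < 6:
--                     hits.append(checked_field)
--                 # If a field containing value >=2 gets on the way -> clear the hits and break, as this will not be valid.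
--                 else:
--                     hits = []
--                     break
--             return hits
--     if orient == 'ver':
--         # Only go further if there's enough space before the board's edge.
--         if field[0] + (n_seg - 1) < 10:
--             for k in range(n_seg):
--                 checked_field = [field[0] + k, field[1]]
--                 # Only allowed 0 (unknown field) and 1 (hit, not yet sunk ships) and on top of existing ships
--                 if board_passed[checked_field[0]][checked_field[1]] < 6:
--                     hits.append(checked_field)
--                 # If a field containing value >=2 gets on the way -> clear the hits and break, as this will not be valid.
--                 else:
--                     hits = []
--                     break
--             return hits
-- ===== SOURCE B (Python) =====
-- def _scan(board, r, c, dr, dc, m):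
--     # Cells [r,c],[r+dr,c+dc],... (m of them) if every one holds a value < 6, else None.
--     if m == 0:
--         return []
--     if board[r][c] >= 6:
--         return None
--     tail = _scan(board, r + dr, c + dc, dr, dc, m - 1)
--     if tail is None:
--         return None
--     return [[r, c]] + tail
--
--
-- def locate_hits_modified(board_passed, n_seg, orient, field):
--     if orient == 'hor':
--         dr, dc = 0, 1
--     elif orient == 'ver':
--         dr, dc = 1, 0
--     else:
--         return None
--     if field[dc] + (n_seg - 1) >= 10:
--         return None
--     if n_seg <= 0:
--         return []
--     cells = _scan(board_passed, field[0], field[1], dr, dc, n_seg)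
--     return [] if cells is None else cells
-- ===== Notes on version B (the rewrite author's own statement) =====
-- stated objective: alternative
-- what changed: Replaces A's two copy-pasted indexed loops with append/clear/break over an accumulator by a single recursive walk of a moving point (r,c) along a direction vector: the recursion checks the current cell, advances the point, propagates None on a blocker and conses the cell onto the recursively built tail; Pre_ excludes only inputs where A raises IndexError (field too short for the chosen branch, or a scanned board cell out of range before a blocker).
import Mathlib
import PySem

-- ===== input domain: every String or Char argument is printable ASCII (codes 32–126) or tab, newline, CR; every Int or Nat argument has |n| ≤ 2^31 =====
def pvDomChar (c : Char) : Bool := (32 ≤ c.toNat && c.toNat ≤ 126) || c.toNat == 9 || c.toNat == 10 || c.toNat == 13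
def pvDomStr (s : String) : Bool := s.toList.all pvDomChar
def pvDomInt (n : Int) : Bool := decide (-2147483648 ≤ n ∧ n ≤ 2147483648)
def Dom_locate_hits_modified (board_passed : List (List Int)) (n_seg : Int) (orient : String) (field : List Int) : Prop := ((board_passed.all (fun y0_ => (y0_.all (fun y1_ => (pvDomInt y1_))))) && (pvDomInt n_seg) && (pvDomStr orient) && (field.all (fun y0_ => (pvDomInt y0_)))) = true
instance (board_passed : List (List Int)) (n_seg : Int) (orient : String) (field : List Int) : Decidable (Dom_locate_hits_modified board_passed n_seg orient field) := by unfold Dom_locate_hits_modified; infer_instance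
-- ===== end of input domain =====

-- B replaces A's two indexed loops with append/clear-on-blocker/break by one recursive
-- walk of a moving point along a direction vector, propagating None past a blocker and
-- consing cells onto the recursively built tail; objective: alternative decomposition.

-- ===== PORT A =====

-- board_passed[r][c] : some value, or none where Python raises IndexError (negative indices wrap, as in Python)
def pvCellVal (board : List (List Int)) (r c : Int) : Option Int :=
  match PySem.List.pyGet? board r with
  | none => none
  | some row => PySem.List.pyGet? row c

-- A's for-loop over k ∈ range(n_seg): append while < 6, on a blocker clear and break.
-- On a missing cell (Python IndexError, excluded by Pre_) it returns [].
def pvAgo (board : List (List Int)) (hor : Bool) (f0 f1 : Int) (ks : List Int)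
    (hits : List (List Int)) : List (List Int) :=
  match ks with
  | [] => hits
  | k :: rest =>
    let cf : List Int := if hor then [f0, f1 + k] else [f0 + k, f1]
    match pvCellVal board (PySem.List.pyGetD cf 0 0) (PySem.List.pyGetD cf 1 0) with
    | some v => if v < 6 then pvAgo board hor f0 f1 rest (hits ++ [cf]) else []
    | none => []

-- field[0]/field[1] via pyGetD 0: Pre_ guarantees the accesses Python performs are in range
def locate_hits_modified (board_passed : List (List Int)) (n_seg : Int) (orient : String) (field : List Int) : Option (List (List Int)) :=
  if orient = "hor" then
    (if PySem.List.pyGetD field 1 0 + (n_seg - 1) < 10 then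
      some (pvAgo board_passed true (PySem.List.pyGetD field 0 0) (PySem.List.pyGetD field 1 0)
        (PySem.List.pyRange 0 n_seg 1) [])
    else none)  -- falls through both ifs: implicit None
  else if orient = "ver" then
    (if PySem.List.pyGetD field 0 0 + (n_seg - 1) < 10 then
      some (pvAgo board_passed false (PySem.List.pyGetD field 0 0) (PySem.List.pyGetD field 1 0)
        (PySem.List.pyRange 0 n_seg 1) [])
    else none)
  else none

-- ===== PORT B =====

-- _scan: cells [r,c],[r+dr,c+dc],… (m of them) if every one holds a value < 6, else none.
-- On a missing cell Python B raises IndexError (outside Pre_); the port returns none there.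
def pvScanB (board : List (List Int)) (dr dc : Int) : Int → Int → Nat → Option (List (List Int))
  | _, _, 0 => some []
  | r, c, m+1 =>
    match pvCellVal board r c with
    | none => none
    | some v =>
      if 6 ≤ v then none
      else
        match pvScanB board dr dc (r + dr) (c + dc) m with
        | none => none
        | some tail => some ([r, c] :: tail)

def locate_hits_modified_alt (board_passed : List (List Int)) (n_seg : Int) (orient : String) (field : List Int) : Option (List (List Int)) :=
  match (if orient = "hor" then some ((0 : Int), (1 : Int))
         else if orient = "ver" then some (1, 0) else none) with
  | none => none
  | some (dr, dc) =>
    if 10 ≤ PySem.List.pyGetD field dc 0 + (n_seg - 1) then none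
    else if n_seg ≤ 0 then some []
    else
      match pvScanB board_passed dr dc (PySem.List.pyGetD field 0 0) (PySem.List.pyGetD field 1 0) n_seg.toNat with
      | none => some []
      | some cells => some cells

-- ===== PRECONDITION & SPEC =====

-- board_passed[r][c] < 6, false on a missing cell
def pvHitB (board : List (List Int)) (cell : List Int) : Bool :=
  match pvCellVal board (PySem.List.pyGetD cell 0 0) (PySem.List.pyGetD cell 1 0) with
  | some v => decide (v < 6)
  | none => false

-- every board cell the directional scan actually reads (up to and including the first
-- non-hit cell) exists; the quantifier is capped at `cap`, a bound past which the
-- "all previous cells were hits" premise is automatically false (hits lie in range)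
def pvScanPre (board : List (List Int)) (cap : Nat) (n : Int) (r0 c0 dr dc : Int) : Bool :=
  (List.range (min n.toNat cap)).all fun i =>
    !((List.range i).all fun j => pvHitB board [r0 + (j : Int) * dr, c0 + (j : Int) * dc])
    || (pvCellVal board (r0 + (i : Int) * dr) (c0 + (i : Int) * dc)).isSome

-- cap for the horizontal scan: hits must lie inside row board[f0], so the premise above
-- is automatically false beyond twice that row's length
def pvRowCap (board : List (List Int)) (r : Int) : Nat :=
  match PySem.List.pyGet? board r with
  | some row => 2 * row.length + 1
  | none => 1

-- Pre_ excludes exactly the inputs on which Python A raises an IndexError: a field list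
-- too short for the accesses the chosen branch performs, or a scanned board cell out of
-- range before any blocker stops the scan.
def Pre_locate_hits_modified (board_passed : List (List Int)) (n_seg : Int) (orient : String) (field : List Int) : Prop :=
  (orient = "hor" →
    2 ≤ field.length ∧
    (PySem.List.pyGetD field 1 0 + (n_seg - 1) < 10 →
      pvScanPre board_passed (pvRowCap board_passed (PySem.List.pyGetD field 0 0))
        n_seg (PySem.List.pyGetD field 0 0) (PySem.List.pyGetD field 1 0) 0 1 = true)) ∧
  (orient = "ver" →
    1 ≤ field.length ∧
    (PySem.List.pyGetD field 0 0 + (n_seg - 1) < 10 →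
      (0 < n_seg → 2 ≤ field.length) ∧
      pvScanPre board_passed (2 * board_passed.length + 1)
        n_seg (PySem.List.pyGetD field 0 0) (PySem.List.pyGetD field 1 0) 1 0 = true))

instance (board_passed : List (List Int)) (n_seg : Int) (orient : String) (field : List Int) : Decidable (Pre_locate_hits_modified board_passed n_seg orient field) := by
  unfold Pre_locate_hits_modified; infer_instance

def pvWitness_locate_hits_modified : List (List Int) × Int × String × List Int :=
  ([[0, 1], [5, 0]], 2, "hor", [0, 0])

def Spec_locate_hits_modified (board_passed : List (List Int)) (n_seg : Int) (orient : String) (field : List Int) (out : Option (List (List Int))) : Prop := out = locate_hits_modified_alt board_passed n_seg orient field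
instance (board_passed : List (List Int)) (n_seg : Int) (orient : String) (field : List Int) (out : Option (List (List Int))) : Decidable (Spec_locate_hits_modified board_passed n_seg orient field out) := by unfold Spec_locate_hits_modified; infer_instance

-- ===== CLAIM (what is proved, stated in full; the proofs are below) =====
def Claim_equal_locate_hits_modified : Prop := ∀ (board_passed : List (List Int)) (n_seg : Int) (orient : String) (field : List Int), Dom_locate_hits_modified board_passed n_seg orient field → Pre_locate_hits_modified board_passed n_seg orient field → Spec_locate_hits_modified board_passed n_seg orient field (locate_hits_modified board_passed n_seg orient field)

-- ===== LEMMAS AND PROOFS =====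

-- A's loop is all-or-nothing: it equals "append all cells if every one is a hit, else []".
lemma pvAgo_eq (board : List (List Int)) (hor : Bool) (f0 f1 : Int) :
    ∀ (ks : List Int) (acc : List (List Int)),
      pvAgo board hor f0 f1 ks acc =
        (if (ks.map (fun k => if hor then [f0, f1 + k] else [f0 + k, f1])).all (pvHitB board)
         then acc ++ ks.map (fun k => if hor then [f0, f1 + k] else [f0 + k, f1])
         else []) := by
  intro ks
  induction ks with
  | nil => intro acc; simp [pvAgo]
  | cons k rest ih =>
    intro acc
    simp only [pvAgo, List.map_cons, List.all_cons]
    have hb : pvHitB board (if hor then [f0, f1 + k] else [f0 + k, f1]) =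
        (match pvCellVal board
            (PySem.List.pyGetD (if hor then [f0, f1 + k] else [f0 + k, f1]) 0 0)
            (PySem.List.pyGetD (if hor then [f0, f1 + k] else [f0 + k, f1]) 1 0) with
          | some v => decide (v < 6) | none => false) := rfl
    cases hcv : pvCellVal board
        (PySem.List.pyGetD (if hor then [f0, f1 + k] else [f0 + k, f1]) 0 0)
        (PySem.List.pyGetD (if hor then [f0, f1 + k] else [f0 + k, f1]) 1 0) with
    | none => simp [hb, hcv]
    | some v =>
      by_cases hv : v < 6
      · simp only [hv, if_pos, hb, hcv, ih]
        simp
      · simp [hb, hcv, hv]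

-- B's recursion is the same all-or-nothing function, over the cells of the walked line.
lemma pvScanB_eq (board : List (List Int)) (dr dc : Int) :
    ∀ (m : Nat) (r c : Int),
      pvScanB board dr dc r c m =
        (if ((List.range m).map (fun (i : Nat) => [r + (i : Int) * dr, c + (i : Int) * dc])).all (pvHitB board)
         then some ((List.range m).map (fun (i : Nat) => [r + (i : Int) * dr, c + (i : Int) * dc]))
         else none) := by
  intro m
  induction m with
  | zero => intro r c; simp [pvScanB]
  | succ m ih =>
    intro r c
    have hcells : (List.range (m + 1)).map (fun (i : Nat) => [r + (i : Int) * dr, c + (i : Int) * dc]) =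
        [r, c] :: (List.range m).map (fun (i : Nat) => [(r + dr) + (i : Int) * dr, (c + dc) + (i : Int) * dc]) := by
      rw [List.range_succ_eq_map, List.map_cons, List.map_map]
      refine congrArg₂ List.cons (by norm_num) (List.map_congr_left ?_)
      intro i _
      simp only [Function.comp, List.cons.injEq, and_true]
      push_cast
      constructor <;> ring
    have hhit : pvHitB board [r, c] =
        (match pvCellVal board r c with
          | some v => decide (v < 6) | none => false) := by
      simp [pvHitB, PySem.List.pyGetD]
    rw [hcells]
    simp only [pvScanB, List.all_cons]
    cases hcv : pvCellVal board r c with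
    | none => simp [hhit, hcv]
    | some v =>
      by_cases hv : 6 ≤ v
      · have : pvHitB board [r, c] = false := by simp [hhit, hcv]; omega
        simp [hv, this]
      · have ht : pvHitB board [r, c] = true := by simp [hhit, hcv]; omega
        simp only [hv, if_false, ht, Bool.true_and, ih]
        by_cases hall : ((List.range m).map (fun (i : Nat) => [(r + dr) + (i : Int) * dr, (c + dc) + (i : Int) * dc])).all (pvHitB board)
        · simp [hall]
        · simp [hall]

-- the cells A's loop maps over equal the cells B's walk visits
lemma pvCells_eq (f0 f1 dr dc : Int) (hor : Bool) (n : Int)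
    (h : (if hor then ((dr, dc) : Int × Int) = (0, 1) else ((dr, dc) : Int × Int) = (1, 0))) :
    (PySem.List.pyRange 0 n 1).map (fun k => if hor then [f0, f1 + k] else [f0 + k, f1]) =
      (List.range n.toNat).map (fun (i : Nat) => [f0 + (i : Int) * dr, f1 + (i : Int) * dc]) := by
  rw [PySem.List.pyRange_one, List.map_map]
  have hn : (n - 0).toNat = n.toNat := by omega
  rw [hn]
  refine List.map_congr_left ?_
  intro i _
  cases hor with
  | true =>
    simp only [if_true, Prod.mk.injEq] at h
    obtain ⟨h1, h2⟩ := h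
    subst h1; subst h2
    simp
  | false =>
    simp only [Prod.mk.injEq] at h
    obtain ⟨h1, h2⟩ := h
    subst h1; subst h2
    simp

-- one orientation, positive segment count: A's loop equals B's walk
lemma pvBranch_eq (board : List (List Int)) (hor : Bool) (dr dc f0 f1 : Int) (n : Int)
    (h : (if hor then ((dr, dc) : Int × Int) = (0, 1) else ((dr, dc) : Int × Int) = (1, 0))) :
    pvAgo board hor f0 f1 (PySem.List.pyRange 0 n 1) [] =
      (match pvScanB board dr dc f0 f1 n.toNat with
       | none => []
       | some cells => cells) := by
  rw [pvAgo_eq, pvCells_eq f0 f1 dr dc hor n h, pvScanB_eq]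
  cases hP : ((List.range n.toNat).map (fun (i : Nat) => [f0 + (i : Int) * dr, f1 + (i : Int) * dc])).all (pvHitB board) with
  | true => simp_all
  | false => simp_all

theorem locate_hits_modified_eq (board_passed : List (List Int)) (n_seg : Int) (orient : String) (field : List Int) :
    locate_hits_modified board_passed n_seg orient field =
      locate_hits_modified_alt board_passed n_seg orient field := by
  unfold locate_hits_modified locate_hits_modified_alt
  by_cases hh : orient = "hor"
  · subst hh
    rw [if_pos rfl]
    show _ = (if (10:Int) ≤ _ then none else _)
    by_cases h1 : PySem.List.pyGetD field 1 0 + (n_seg - 1) < 10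
    · rw [if_pos h1, if_neg (by omega)]
      by_cases hn : n_seg ≤ 0
      · rw [if_pos hn, PySem.List.pyRange_one_eq_nil hn]
        simp [pvAgo]
      · rw [if_neg hn, pvBranch_eq board_passed true 0 1 _ _ n_seg rfl]
        cases pvScanB board_passed 0 1 (PySem.List.pyGetD field 0 0) (PySem.List.pyGetD field 1 0) n_seg.toNat <;> rfl
    · rw [if_neg h1, if_pos (by omega)]
  · by_cases hv : orient = "ver"
    · subst hv
      rw [if_neg hh, if_pos rfl]
      show _ = (if (10:Int) ≤ _ then none else _)
      by_cases h1 : PySem.List.pyGetD field 0 0 + (n_seg - 1) < 10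
      · rw [if_pos h1, if_neg (by omega)]
        by_cases hn : n_seg ≤ 0
        · rw [if_pos hn, PySem.List.pyRange_one_eq_nil hn]
          simp [pvAgo]
        · rw [if_neg hn, pvBranch_eq board_passed false 1 0 _ _ n_seg rfl]
          cases pvScanB board_passed 1 0 (PySem.List.pyGetD field 0 0) (PySem.List.pyGetD field 1 0) n_seg.toNat <;> rfl
      · rw [if_neg h1, if_pos (by omega)]
    · simp only [if_neg hh, if_neg hv]

-- ===== VERDICT (by name: the statement is the Claim_ definition above) =====
theorem locate_hits_modified_spec : Claim_equal_locate_hits_modified := by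
  intro board_passed n_seg orient field _ _
  unfold Spec_locate_hits_modified
  exact locate_hits_modified_eq board_passed n_seg orient field
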